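-- pv_equiv track=rewrite | github.com/dannyphan2910/stocket | stocket/lib/utils.py | pair_symbol_json
-- ===== SOURCE A (Python) =====
-- def pair_symbol_json(dict1, name1, dict2, name2):
--     result = {}
--     for symbol, data in dict1.items():
--         result.setdefault(symbol, {})
--         result[symbol][name1] = data
--
--     for symbol, data in dict2.items():
--         result.setdefault(symbol, {})
--         result[symbol][name2] = data
--
--     return result
-- ===== SOURCE B (Python) =====
-- def pair_symbol_json(dict1, name1, dict2, name2):
--     def inner(symbol):
--         d = {}
--         if symbol in dict1:
--             d[name1] = dict1[symbol]
--         if symbol in dict2: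
--             d[name2] = dict2[symbol]
--         return d
--     symbols = list(dict1) + [s for s in dict2 if s not in dict1]
--     return {s: inner(s) for s in symbols}
-- ===== Notes on version B (the rewrite author's own statement) =====
-- stated objective: alternative
-- what changed: Replaces A's two setdefault-and-mutate passes over a shared result dict with one pass over the merged key sequence (dict1 keys, then dict2-only keys) that builds each complete inner dict in one shot; Pre_ excludes association lists with duplicate keys, which cannot arise from Python dict arguments (the Lean ports read them differently: first- vs last-occurrence).
import Mathlib
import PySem

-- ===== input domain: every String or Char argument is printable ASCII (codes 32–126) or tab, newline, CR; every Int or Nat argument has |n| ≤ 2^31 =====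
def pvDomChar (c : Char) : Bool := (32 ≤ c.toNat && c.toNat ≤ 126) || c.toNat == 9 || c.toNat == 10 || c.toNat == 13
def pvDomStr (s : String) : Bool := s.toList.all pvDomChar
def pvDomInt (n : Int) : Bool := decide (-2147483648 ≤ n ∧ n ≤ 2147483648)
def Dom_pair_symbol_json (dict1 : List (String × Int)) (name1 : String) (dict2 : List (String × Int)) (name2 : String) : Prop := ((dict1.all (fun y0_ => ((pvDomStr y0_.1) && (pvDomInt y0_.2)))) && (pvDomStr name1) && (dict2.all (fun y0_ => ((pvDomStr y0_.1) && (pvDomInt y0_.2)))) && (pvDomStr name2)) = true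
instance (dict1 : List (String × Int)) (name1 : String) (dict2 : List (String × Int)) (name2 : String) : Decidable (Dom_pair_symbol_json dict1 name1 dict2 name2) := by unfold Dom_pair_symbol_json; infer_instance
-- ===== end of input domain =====

-- B replaces A's two setdefault-and-mutate passes with a single pass over the merged key order that
-- builds each complete inner dict in one shot (objective: alternative decomposition, same cost).

-- ===== PORT A =====
-- one loop body of A: result.setdefault(symbol, {}); result[symbol][name] = data
def psjStep (name : String) (r : PySem.Dict String (PySem.Dict String Int)) (p : String × Int) :
    PySem.Dict String (PySem.Dict String Int) :=
  let r := r.setdefault p.1 PySem.Dict.empty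
  r.insert p.1 ((r.getD p.1 PySem.Dict.empty).insert name p.2)

def pair_symbol_json (dict1 : List (String × Int)) (name1 : String) (dict2 : List (String × Int)) (name2 : String) : List (String × List (String × Int)) :=
  let result : PySem.Dict String (PySem.Dict String Int) := PySem.Dict.empty
  let result := dict1.foldl (psjStep name1) result
  let result := dict2.foldl (psjStep name2) result
  result.items.map (fun p => (p.1, p.2.items))

-- ===== PORT B =====
-- inner(symbol) of Source B: {} plus name1:dict1[symbol] if present, plus name2:dict2[symbol] if present
def psjInner (d1 d2 : PySem.Dict String Int) (name1 name2 symbol : String) : PySem.Dict String Int :=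
  let d : PySem.Dict String Int := PySem.Dict.empty
  let d := match d1.get? symbol with
    | some v => d.insert name1 v
    | none => d
  match d2.get? symbol with
  | some v => d.insert name2 v
  | none => d

def pair_symbol_json_alt (dict1 : List (String × Int)) (name1 : String) (dict2 : List (String × Int)) (name2 : String) : List (String × List (String × Int)) :=
  let d1 : PySem.Dict String Int := PySem.Dict.mk dict1
  let d2 : PySem.Dict String Int := PySem.Dict.mk dict2
  let symbols := d1.keys ++ d2.keys.filter (fun s => !(d1.contains s))
  (symbols.foldl (fun r s => r.insert s (psjInner d1 d2 name1 name2 s)) PySem.Dict.empty).items.map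
    (fun p => (p.1, p.2.items))

-- ===== PRECONDITION & SPEC =====
-- Pre_ excludes association lists with duplicate keys: such inputs cannot arise from Python dict
-- arguments (a Python dict has unique keys), and the two ports read a duplicated key differently.
def Pre_pair_symbol_json (dict1 : List (String × Int)) (name1 : String) (dict2 : List (String × Int)) (name2 : String) : Prop :=
  (dict1.map Prod.fst).Nodup ∧ (dict2.map Prod.fst).Nodup
instance (dict1 : List (String × Int)) (name1 : String) (dict2 : List (String × Int)) (name2 : String) : Decidable (Pre_pair_symbol_json dict1 name1 dict2 name2) := by unfold Pre_pair_symbol_json; infer_instance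

def pvWitness_pair_symbol_json : (List (String × Int)) × String × (List (String × Int)) × String :=
  ([("AAPL", 3), ("MSFT", -1)], "price", [("MSFT", 7), ("TSLA", 0)], "volume")

def Spec_pair_symbol_json (dict1 : List (String × Int)) (name1 : String) (dict2 : List (String × Int)) (name2 : String) (out : List (String × List (String × Int))) : Prop := out = pair_symbol_json_alt dict1 name1 dict2 name2
instance (dict1 : List (String × Int)) (name1 : String) (dict2 : List (String × Int)) (name2 : String) (out : List (String × List (String × Int))) : Decidable (Spec_pair_symbol_json dict1 name1 dict2 name2 out) := by unfold Spec_pair_symbol_json; infer_instance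

-- ===== CLAIM (what is proved, stated in full; the proofs are below) =====
def Claim_equal_pair_symbol_json : Prop := ∀ (dict1 : List (String × Int)) (name1 : String) (dict2 : List (String × Int)) (name2 : String), Dom_pair_symbol_json dict1 name1 dict2 name2 → Pre_pair_symbol_json dict1 name1 dict2 name2 → Spec_pair_symbol_json dict1 name1 dict2 name2 (pair_symbol_json dict1 name1 dict2 name2)

-- ===== LEMMAS AND PROOFS =====

-- the common "replace e by its name2-updated form according to l2" map used to describe A's second loop
def psjF (l2 : List (String × Int)) (name2 : String) (e : String × PySem.Dict String Int) :
    String × PySem.Dict String Int :=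
  match (PySem.Dict.mk l2).get? e.1 with
  | some v2 => (e.1, e.2.insert name2 v2)
  | none => e

theorem psjStep_fresh (name : String) (r : PySem.Dict String (PySem.Dict String Int))
    (p : String × Int) (h : r.contains p.1 = false) :
    psjStep name r p = r.insert p.1 (PySem.Dict.mk [(name, p.2)]) := by
  simp only [psjStep]
  rw [PySem.Dict.setdefault_of_not_contains _ _ h,
      PySem.Dict.getD_insert_self, PySem.Dict.insert_insert_self]
  rfl

theorem psjStep_mem (name : String) (r : PySem.Dict String (PySem.Dict String Int))
    (q : String × Int) (h : r.contains q.1 = true) :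
    psjStep name r q = r.insert q.1 ((r.getD q.1 PySem.Dict.empty).insert name q.2) := by
  simp only [psjStep]
  rw [PySem.Dict.setdefault_of_contains _ _ h]

theorem nodup_keys_psjStep (name : String) (r : PySem.Dict String (PySem.Dict String Int))
    (p : String × Int) (h : r.keys.Nodup) : (psjStep name r p).keys.Nodup := by
  by_cases hc : r.contains p.1
  · rw [psjStep_mem name r p hc]; exact PySem.Dict.nodup_keys_insert _ _ _ h
  · rw [psjStep_fresh name r p (by simpa using hc)]
    exact PySem.Dict.nodup_keys_insert _ _ _ h

theorem psj_loop1 (name : String) :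
    ∀ (l : List (String × Int)) (r : PySem.Dict String (PySem.Dict String Int)),
      (l.map Prod.fst).Nodup → (∀ p ∈ l, r.contains p.1 = false) →
      (l.foldl (psjStep name) r).items
        = r.items ++ l.map (fun p => (p.1, PySem.Dict.mk [(name, p.2)])) := by
  intro l
  induction l with
  | nil => intro r _ _; simp
  | cons p t ih =>
    intro r hnd hfresh
    have hp : r.contains p.1 = false := hfresh p (List.mem_cons_self ..)
    have hne : ∀ q ∈ t, q.1 ≠ p.1 := by
      intro q hq
      have : p.1 ∉ t.map Prod.fst := (List.nodup_cons.mp hnd).1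
      intro h; exact this (h ▸ List.mem_map_of_mem hq)
    rw [List.foldl_cons, psjStep_fresh name r p hp,
        ih _ (List.nodup_cons.mp hnd).2 (by
          intro q hq
          rw [PySem.Dict.contains_insert]
          simp [hne q hq, hfresh q (List.mem_cons_of_mem _ hq)]),
        PySem.Dict.items_insert_of_not_contains _ _ hp]
    simp

theorem psj_loop2 (name2 : String) :
    ∀ (l2 : List (String × Int)) (r : PySem.Dict String (PySem.Dict String Int)),
      r.keys.Nodup → (l2.map Prod.fst).Nodup →
      (l2.foldl (psjStep name2) r).items
        = r.items.map (psjF l2 name2)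
          ++ (l2.filter (fun q => !(r.contains q.1))).map
              (fun q => (q.1, PySem.Dict.mk [(name2, q.2)])) := by
  intro l2
  induction l2 with
  | nil =>
    intro r _ _
    have : ∀ e ∈ r.items, psjF [] name2 e = e := by intro e _; simp [psjF]; rfl
    simp [List.map_congr_left this]
  | cons q t ih =>
    intro r hr hnd
    obtain ⟨qk, qv⟩ := q
    have hqt : (qk, qv).1 ∉ t.map Prod.fst := (List.nodup_cons.mp hnd).1
    have hget_t : (PySem.Dict.mk t).get? (qk, qv).1 = none := by
      rw [PySem.Dict.get?_eq_none_iff_not_mem_keys]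
      simpa using hqt
    have hne : ∀ p ∈ t, p.1 ≠ (qk, qv).1 := by
      intro p hp h; exact hqt (h ▸ List.mem_map_of_mem hp)
    rw [List.foldl_cons, ih _ (nodup_keys_psjStep name2 r (qk, qv) hr) (List.nodup_cons.mp hnd).2]
    by_cases hc : r.contains (qk, qv).1
    · rw [psjStep_mem name2 r (qk, qv) hc]
      rw [PySem.Dict.items_insert_of_contains _ _ hc]
      have hmap : (r.items.map (fun p => if p.1 == (qk, qv).1 then ((qk, qv).1, (r.getD (qk, qv).1 PySem.Dict.empty).insert name2 (qk, qv).2) else p)).map (psjF t name2)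
          = r.items.map (psjF ((qk, qv) :: t) name2) := by
        rw [List.map_map]
        apply List.map_congr_left
        intro e he
        by_cases heq : e.1 = (qk, qv).1
        · have he' : ((qk, qv).1, e.2) ∈ r.items := by rw [← heq]; exact Prod.mk.eta ▸ he
          have hgd : r.getD (qk, qv).1 PySem.Dict.empty = e.2 :=
            PySem.Dict.getD_of_mem_items _ he' hr _
          simp [Function.comp, heq, psjF, PySem.Dict.get?_mk_cons, hgd, hget_t]
        · have hb : ((qk, qv).1 == e.1) = false := by simpa using (Ne.symm heq)
          have hb' : (e.1 == (qk, qv).1) = false := by simpa using heq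
          simp [Function.comp, psjF, PySem.Dict.get?_mk_cons, hb, hb']
      rw [hmap]
      have hfilt : t.filter (fun p => !((r.insert (qk, qv).1 ((r.getD (qk, qv).1 PySem.Dict.empty).insert name2 (qk, qv).2)).contains p.1))
          = t.filter (fun p => !(r.contains p.1)) := by
        apply List.filter_congr
        intro p hp
        rw [PySem.Dict.contains_insert]
        simp [hne p hp]
      rw [hfilt]
      have : ((qk, qv) :: t).filter (fun p => !(r.contains p.1)) = t.filter (fun p => !(r.contains p.1)) := by
        simp [List.filter_cons, hc]
      rw [this]
    · have hc' : r.contains (qk, qv).1 = false := by simpa using hc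
      rw [psjStep_fresh name2 r (qk, qv) hc']
      rw [PySem.Dict.items_insert_of_not_contains _ _ hc']
      have hq_notin_r : (qk, qv).1 ∉ r.keys := by
        intro h
        rw [← PySem.Dict.contains_iff_mem_keys] at h
        simp [hc'] at h
      have hmap : ((r.items ++ [((qk, qv).1, PySem.Dict.mk [(name2, (qk, qv).2)])]).map (psjF t name2))
          = r.items.map (psjF ((qk, qv) :: t) name2) ++ [((qk, qv).1, PySem.Dict.mk [(name2, (qk, qv).2)])] := by
        rw [List.map_append]
        congr 1
        · apply List.map_congr_left
          intro e he
          have heq : e.1 ≠ (qk, qv).1 := by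
            intro h
            exact hq_notin_r (h ▸ PySem.Dict.mem_keys_of_mem_items _ he)
          have hbq : ((qk, qv).1 == e.1) = false := by simpa using (Ne.symm heq)
          simp [psjF, PySem.Dict.get?_mk_cons, hbq]
        · simp [psjF, hget_t]
      rw [hmap]
      have hfilt : t.filter (fun p => !((r.insert (qk, qv).1 (PySem.Dict.mk [(name2, (qk, qv).2)])).contains p.1))
          = t.filter (fun p => !(r.contains p.1)) := by
        apply List.filter_congr
        intro p hp
        rw [PySem.Dict.contains_insert]
        simp [hne p hp]
      rw [hfilt]
      have : ((qk, qv) :: t).filter (fun p => !(r.contains p.1))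
          = (qk, qv) :: t.filter (fun p => !(r.contains p.1)) := by
        simp [List.filter_cons, hc']
      rw [this]
      simp

-- ===== VERDICT (by name: the statement is the Claim_ definition above) =====
theorem pair_symbol_json_spec : Claim_equal_pair_symbol_json := by
  intro dict1 name1 dict2 name2 _ hpre
  obtain ⟨h1, h2⟩ := hpre
  unfold Spec_pair_symbol_json
  simp only [pair_symbol_json, pair_symbol_json_alt]
  -- A's first loop
  have hA1 : (dict1.foldl (psjStep name1) PySem.Dict.empty).items
      = dict1.map (fun p => (p.1, PySem.Dict.mk [(name1, p.2)])) := by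
    have := psj_loop1 name1 dict1 PySem.Dict.empty h1 (fun p _ => PySem.Dict.contains_empty _)
    simpa using this
  have hkeys1 : (dict1.foldl (psjStep name1) PySem.Dict.empty).keys = dict1.map Prod.fst := by
    simp only [PySem.Dict.keys, hA1, List.map_map]
    rfl
  have hnd1 : (dict1.foldl (psjStep name1) PySem.Dict.empty).keys.Nodup := hkeys1 ▸ h1
  rw [psj_loop2 name2 dict2 _ hnd1 h2, hA1]
  -- normalise the two membership tests to the same decide
  have hcontA : dict2.filter
        (fun q => !((dict1.foldl (psjStep name1) PySem.Dict.empty).contains q.1))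
      = dict2.filter (fun q => !(decide (q.1 ∈ dict1.map Prod.fst))) := by
    apply List.filter_congr
    intro q _
    rw [PySem.Dict.contains_eq_decide_mem_keys, hkeys1]
  rw [hcontA]
  -- B's single pass over the merged key order
  have hkmk1 : (PySem.Dict.mk dict1 : PySem.Dict String Int).keys = dict1.map Prod.fst := by
    simpa using PySem.Dict.keys_mk dict1
  have hkmk2 : (PySem.Dict.mk dict2 : PySem.Dict String Int).keys = dict2.map Prod.fst := by
    simpa using PySem.Dict.keys_mk dict2
  have hcontB : ∀ s, (PySem.Dict.mk dict1 : PySem.Dict String Int).contains s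
      = decide (s ∈ dict1.map Prod.fst) := by
    intro s; rw [PySem.Dict.contains_eq_decide_mem_keys, hkmk1]
  have hfiltB : ((PySem.Dict.mk dict2 : PySem.Dict String Int).keys).filter
        (fun s => !((PySem.Dict.mk dict1 : PySem.Dict String Int).contains s))
      = (dict2.filter (fun q => !(decide (q.1 ∈ dict1.map Prod.fst)))).map Prod.fst := by
    rw [hkmk2]
    rw [show (fun s => !((PySem.Dict.mk dict1 : PySem.Dict String Int).contains s))
        = (fun s => !(decide (s ∈ dict1.map Prod.fst))) from funext (fun s => by rw [hcontB])]
    rw [List.filter_map]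
    rfl
  have hsymNodup : ((PySem.Dict.mk dict1 : PySem.Dict String Int).keys
      ++ ((PySem.Dict.mk dict2 : PySem.Dict String Int).keys).filter
          (fun s => !((PySem.Dict.mk dict1 : PySem.Dict String Int).contains s))).Nodup := by
    rw [hkmk1, hfiltB]
    refine List.Nodup.append h1 ?_ ?_
    · exact ((List.filter_sublist (l := dict2)).map Prod.fst).nodup h2
    · intro a ha hb
      obtain ⟨q, hq, rfl⟩ := List.mem_map.mp hb
      have hfq : (!decide (q.1 ∈ dict1.map Prod.fst)) = true := by
        have := (List.mem_filter.mp hq).2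
        simpa using this
      simp [ha] at hfq
  have hB := PySem.Dict.items_foldl_insert_fresh
      ((PySem.Dict.mk dict1 : PySem.Dict String Int).keys
        ++ ((PySem.Dict.mk dict2 : PySem.Dict String Int).keys).filter
            (fun s => !((PySem.Dict.mk dict1 : PySem.Dict String Int).contains s)))
      (fun s => s)
      (fun s => psjInner (PySem.Dict.mk dict1) (PySem.Dict.mk dict2) name1 name2 s)
      PySem.Dict.empty
      (fun a _ => PySem.Dict.contains_empty _)
      (by simpa using hsymNodup)
  rw [hB]
  simp only [show (PySem.Dict.empty : PySem.Dict String (PySem.Dict String Int)).items = []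
      from rfl, List.nil_append, List.map_append, List.map_map]
  rw [hkmk1, hfiltB]
  congr 1
  · -- dict1 part
    rw [List.map_map]
    apply List.map_congr_left
    intro p hp
    have hmem1 : (p.1, p.2) ∈ (PySem.Dict.mk dict1 : PySem.Dict String Int).items :=
      Prod.mk.eta ▸ hp
    have hget1 : (PySem.Dict.mk dict1 : PySem.Dict String Int).get? p.1 = some p.2 :=
      PySem.Dict.get?_of_mem_items _ hmem1 (hkmk1 ▸ h1)
    rcases hd2 : (PySem.Dict.mk dict2 : PySem.Dict String Int).get? p.1 with _ | v2 <;>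
      simp [Function.comp, psjF, psjInner, hget1, hd2] <;> rfl
  · -- dict2-only part
    rw [List.map_map]
    apply List.map_congr_left
    intro q hq
    have hqd2 : q ∈ dict2 := List.mem_of_mem_filter hq
    have hnotin : q.1 ∉ dict1.map Prod.fst := by
      have := (List.mem_filter.mp hq).2
      simpa using this
    have hget1 : (PySem.Dict.mk dict1 : PySem.Dict String Int).get? q.1 = none := by
      rw [PySem.Dict.get?_eq_none_iff_not_mem_keys, hkmk1]; exact hnotin
    have hmem2 : (q.1, q.2) ∈ (PySem.Dict.mk dict2 : PySem.Dict String Int).items :=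
      Prod.mk.eta ▸ hqd2
    have hget2 : (PySem.Dict.mk dict2 : PySem.Dict String Int).get? q.1 = some q.2 :=
      PySem.Dict.get?_of_mem_items _ hmem2 (hkmk2 ▸ h2)
    simp [Function.comp, psjInner, hget1, hget2]
    rfl
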